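-- pv_equiv track=rewrite | github.com/MaorBemdoo/Number-base-system-converter | lib/converters/hexadecimal_to _octal.py | hexadecimal_to_octal
-- ===== SOURCE A (Python) =====
-- def hexadecimal_to_octal(number):
--     hex_to_dec_dictionary = {
--         '0': 0, '1': 1, '2': 2, '3': 3, '4': 4, '5': 5,
--         '6': 6, '7': 7, '8': 8, '9': 9, 'A': 10, 'B': 11,
--         'C': 12, 'D': 13, 'E': 14, 'F': 15
--     }
--
--     # Convert hexadecimal number to decimal
--     decimal_number = 0
--     for base in number:
--         decimal_number = decimal_number * 16 + hex_to_dec_dictionary[base.upper()]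
--
--     # Special case for 0
--     if decimal_number == 0:
--         return '0'
--
--     # Convert decimal to octal
--     octal_number = ''
--     while decimal_number > 0:
--         octal_value = decimal_number % 8
--         octal_number = str(octal_value) + octal_number
--         decimal_number //= 8
--
--     return octal_number
-- ===== SOURCE B (Python) =====
-- def hexadecimal_to_octal(number):
--     hex_to_bin_dictionary = {
--         '0': '0000', '1': '0001', '2': '0010', '3': '0011',
--         '4': '0100', '5': '0101', '6': '0110', '7': '0111',
--         '8': '1000', '9': '1001', 'A': '1010', 'B': '1011',
--         'C': '1100', 'D': '1101', 'E': '1110', 'F': '1111'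
--     }
--
--     # Hexadecimal to binary, drop leading zeros
--     bits = ''.join(hex_to_bin_dictionary[c.upper()] for c in number).lstrip('0')
--     if not bits:
--         return '0'
--
--     # Left-pad to a multiple of 3 bits, then read 3-bit groups as octal digits
--     bits = '0' * (-len(bits) % 3) + bits
--     return ''.join(str(int(bits[i:i + 3], 2)) for i in range(0, len(bits), 3))
-- ===== Notes on version B (the rewrite author's own statement) =====
-- stated objective: faster
-- what changed: B converts via a binary intermediate: each hex digit maps to its 4-bit string, leading zeros are stripped, the bit string is left-padded to a multiple of 3 and read in 3-bit groups as octal digits, replacing A's big-int decimal accumulator with its repeated % 8 and // 8 loop.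
import Mathlib
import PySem

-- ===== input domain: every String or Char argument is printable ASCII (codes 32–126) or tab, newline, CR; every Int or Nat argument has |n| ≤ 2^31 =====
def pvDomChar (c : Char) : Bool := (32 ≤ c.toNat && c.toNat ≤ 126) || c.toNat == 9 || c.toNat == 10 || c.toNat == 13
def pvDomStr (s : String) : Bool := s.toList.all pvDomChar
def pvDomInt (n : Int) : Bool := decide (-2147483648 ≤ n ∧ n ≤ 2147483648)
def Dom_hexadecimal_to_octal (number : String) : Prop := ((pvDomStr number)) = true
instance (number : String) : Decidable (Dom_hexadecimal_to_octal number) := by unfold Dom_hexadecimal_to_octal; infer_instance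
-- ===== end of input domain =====

-- B converts through a binary intermediate (4-bit nibbles, strip leading zeros, pad, read 3-bit
-- groups) instead of A's decimal accumulator with repeated % 8 and // 8; same return value on hex strings.

-- ===== PORT A =====
-- A's dict literal as a lookup function; `none` is exactly Python's KeyError (excluded by Pre_).
def hexDec? (c : Char) : Option Int :=
  match c with
  | '0' => some 0 | '1' => some 1 | '2' => some 2 | '3' => some 3
  | '4' => some 4 | '5' => some 5 | '6' => some 6 | '7' => some 7
  | '8' => some 8 | '9' => some 9 | 'A' => some 10 | 'B' => some 11
  | 'C' => some 12 | 'D' => some 13 | 'E' => some 14 | 'F' => some 15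
  | _ => none

-- the `while decimal_number > 0` loop, with `octal_number` as the accumulator built by prepending
def aOctLoop (n : Int) (acc : List Char) : List Char :=
  if 0 < n then
    aOctLoop (PySem.Int.floordiv n 8) (PySem.Int.toChars (PySem.Int.mod n 8) ++ acc)
  else acc
termination_by n.toNat
decreasing_by
  rw [PySem.Int.floordiv_eq_ediv_of_pos (show (0:Int) < 8 by norm_num)]
  omega

def hexadecimal_to_octal (number : String) : String :=
  let d := number.toList.foldl
    (fun acc c => acc * 16 + (hexDec? (PySem.Chars.upperChar c)).getD 0) 0
  if d == 0 then "0" else String.ofList (aOctLoop d [])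

-- ===== PORT B =====
-- B's dict literal as a lookup function; `none` is exactly Python's KeyError (excluded by Pre_).
def hexBin? (c : Char) : Option (List Char) :=
  match c with
  | '0' => some ['0','0','0','0'] | '1' => some ['0','0','0','1']
  | '2' => some ['0','0','1','0'] | '3' => some ['0','0','1','1']
  | '4' => some ['0','1','0','0'] | '5' => some ['0','1','0','1']
  | '6' => some ['0','1','1','0'] | '7' => some ['0','1','1','1']
  | '8' => some ['1','0','0','0'] | '9' => some ['1','0','0','1']
  | 'A' => some ['1','0','1','0'] | 'B' => some ['1','0','1','1']
  | 'C' => some ['1','1','0','0'] | 'D' => some ['1','1','0','1']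
  | 'E' => some ['1','1','1','0'] | 'F' => some ['1','1','1','1']
  | _ => none

-- the join over `range(0, len(bits), 3)`: one 3-bit group per step, via int(group, 2) and str()
def bGroupLoop (bs : List Char) : List Char :=
  if hbs : bs = [] then [] else
    PySem.Int.toChars ((PySem.Int.ofCharsBase? (bs.take 3) 2).getD 0) ++ bGroupLoop (bs.drop 3)
termination_by bs.length
decreasing_by
  cases bs with
  | nil => exact absurd rfl hbs
  | cons x xs => simp

def hexadecimal_to_octal_alt (number : String) : String :=
  let bits := (number.toList.map (fun c => (hexBin? (PySem.Chars.upperChar c)).getD [])).flatten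
  -- .lstrip('0') on a 0/1 string is exactly dropWhile (· == '0')
  let stripped := bits.dropWhile (· == '0')
  if stripped = [] then "0"
  else String.ofList (bGroupLoop (List.replicate ((3 - stripped.length % 3) % 3) '0' ++ stripped))

-- ===== PRECONDITION & SPEC =====
def hexChars : List Char :=
  ['0','1','2','3','4','5','6','7','8','9','a','b','c','d','e','f','A','B','C','D','E','F']

-- A raises KeyError on any character that is not a hex digit (either case); Pre_ admits exactly the strings A returns on.
def Pre_hexadecimal_to_octal (number : String) : Prop :=
  number.toList.all (fun c => hexChars.contains c) = true
instance (number : String) : Decidable (Pre_hexadecimal_to_octal number) := by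
  unfold Pre_hexadecimal_to_octal; infer_instance
def pvWitness_hexadecimal_to_octal : String := "1aF0"

def Spec_hexadecimal_to_octal (number : String) (out : String) : Prop := out = hexadecimal_to_octal_alt number
instance (number : String) (out : String) : Decidable (Spec_hexadecimal_to_octal number out) := by unfold Spec_hexadecimal_to_octal; infer_instance

-- ===== CLAIM (what is proved, stated in full; the proofs are below) =====
def Claim_equal_hexadecimal_to_octal : Prop := ∀ (number : String), Dom_hexadecimal_to_octal number → Pre_hexadecimal_to_octal number → Spec_hexadecimal_to_octal number (hexadecimal_to_octal number)

-- ===== LEMMAS AND PROOFS =====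

-- the digit character for k (octal/binary digits; k ≤ 9)
def dChar (k : Nat) : Char := Char.ofNat (48 + k)

-- canonical big-endian base-8 digits of n (empty for 0)
def canonOct (n : Nat) : List Char :=
  if n = 0 then [] else canonOct (n / 8) ++ [dChar (n % 8)]

-- canonical big-endian base-2 digits of n (empty for 0)
def canonBits (n : Nat) : List Char :=
  if n = 0 then [] else canonBits (n / 2) ++ [dChar (n % 2)]

-- the Nat value of one hex digit, and of A's accumulator fold
def hvN (c : Char) : Nat := ((hexDec? (PySem.Chars.upperChar c)).getD 0).toNat
def natFold (cs : List Char) : Nat := cs.foldl (fun a c => a * 16 + hvN c) 0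

def bitStep (a : Nat) (c : Char) : Nat := 2 * a + (if c == '1' then 1 else 0)
def nib (c : Char) : List Char := (hexBin? (PySem.Chars.upperChar c)).getD []
def threeBits (k : Nat) : List Char := [dChar (k / 4), dChar (k / 2 % 2), dChar (k % 2)]
def pad (l : List Char) : List Char := List.replicate ((3 - l.length % 3) % 3) '0' ++ l

theorem hexDec?_nonneg (c : Char) : (0:Int) ≤ (hexDec? c).getD 0 := by
  unfold hexDec?; split <;> simp

theorem foldA_cast (cs : List Char) : ∀ a : Nat,
    cs.foldl (fun acc c => acc * 16 + (hexDec? (PySem.Chars.upperChar c)).getD 0) (a : Int)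
      = ((cs.foldl (fun a c => a * 16 + hvN c) a : Nat) : Int) := by
  induction cs with
  | nil => intro a; simp
  | cons c cs ih =>
    intro a
    simp only [List.foldl_cons]
    have h := hexDec?_nonneg (PySem.Chars.upperChar c)
    have : ((a : Int) * 16 + (hexDec? (PySem.Chars.upperChar c)).getD 0)
        = ((a * 16 + hvN c : Nat) : Int) := by
      unfold hvN; push_cast; omega
    rw [this, ih]

theorem toChars_small (k : Nat) (hk : k < 8) : PySem.Int.toChars (k : Int) = [dChar k] := by
  interval_cases k <;> decide

theorem aOctLoop_eq (n : Nat) : ∀ acc, aOctLoop (n : Int) acc = canonOct n ++ acc := by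
  induction n using Nat.strong_induction_on with
  | _ n ih =>
    intro acc
    rw [aOctLoop, canonOct]
    by_cases h : n = 0
    · subst h; simp
    · have hpos : (0:Int) < (n : Int) := by omega
      rw [if_pos hpos]
      rw [show PySem.Int.floordiv (n : Int) 8 = ((n / 8 : Nat) : Int) from PySem.Int.floordiv_natCast n 8,
          show PySem.Int.mod (n : Int) 8 = ((n % 8 : Nat) : Int) from PySem.Int.mod_natCast n 8,
          toChars_small _ (Nat.mod_lt _ (by norm_num))]
      rw [ih (n / 8) (Nat.div_lt_self (by omega) (by norm_num))]
      simp [h]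

-- shifting the accumulator of the bit fold
theorem foldl_bitStep_shift (l : List Char) : ∀ a, l.foldl bitStep a = a * 2 ^ l.length + l.foldl bitStep 0 := by
  induction l with
  | nil => intro a; simp
  | cons c l ih =>
    intro a
    simp only [List.foldl_cons, List.length_cons]
    rw [ih (bitStep a c), ih (bitStep 0 c)]
    unfold bitStep
    ring

-- per-hex-digit facts about B's nibble: 4 bits long, folds to hvN c, made of 0/1 chars
theorem nib_spec (c : Char) (hc : hexChars.contains c = true) :
    (nib c).length = 4 ∧ (nib c).foldl bitStep 0 = hvN c
      ∧ (nib c).all (fun ch => ch == '0' || ch == '1') = true := by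
  have hmem : c ∈ hexChars := by simpa [hexChars] using hc
  fin_cases hmem <;> exact ⟨by decide, by decide, by decide⟩

theorem flatten_fold (cs : List Char)
    (hcs : ∀ c ∈ cs, hexChars.contains c = true) :
    ∀ a, ((cs.map nib).flatten).foldl bitStep a = cs.foldl (fun a c => a * 16 + hvN c) a := by
  induction cs with
  | nil => intro a; simp
  | cons c cs ih =>
    intro a
    simp only [List.map_cons, List.flatten_cons, List.foldl_append, List.foldl_cons]
    obtain ⟨hl, hf, -⟩ := nib_spec c (hcs c (by simp))
    rw [foldl_bitStep_shift (nib c) a, hl, hf, ih (fun x hx => hcs x (by simp [hx]))]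
    norm_num

theorem flatten_bits (cs : List Char)
    (hcs : ∀ c ∈ cs, hexChars.contains c = true) :
    ∀ ch ∈ (cs.map nib).flatten, ch = '0' ∨ ch = '1' := by
  intro ch hch
  simp only [List.mem_flatten, List.mem_map] at hch
  obtain ⟨l, ⟨c, hc, rfl⟩, hin⟩ := hch
  have hall := List.all_eq_true.mp (nib_spec c (hcs c hc)).2.2 ch hin
  simp only [Bool.or_eq_true, beq_iff_eq] at hall
  exact hall

theorem dropWhile_fold (l : List Char) :
    (l.dropWhile (· == '0')).foldl bitStep 0 = l.foldl bitStep 0 := by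
  induction l with
  | nil => rfl
  | cons c cs ih =>
    by_cases h : c = '0'
    · subst h; simpa [List.dropWhile, bitStep] using ih
    · have hb : (c == '0') = false := by simpa using h
      simp [List.dropWhile, hb]

-- the head of lstrip('0') on a 0/1 string is '1' (or the string is empty)
theorem dropWhile_zero_head (l : List Char) (hb : ∀ c ∈ l, c = '0' ∨ c = '1') :
    l.dropWhile (· == '0') = [] ∨ (l.dropWhile (· == '0')).head? = some '1' := by
  cases h : l.dropWhile (· == '0') with
  | nil => exact Or.inl rfl
  | cons a t =>
    right
    have hne : l.dropWhile (· == '0') ≠ [] := by simp [h]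
    have hhd := List.head_dropWhile_not (· == '0') hne
    simp only [h, List.head_cons] at hhd
    have hmem : a ∈ l := (List.dropWhile_sublist _).mem (h ▸ List.mem_cons_self)
    rcases hb a hmem with rfl | rfl
    · simp at hhd
    · simp

theorem canonBits_unique (l : List Char) (hb : ∀ c ∈ l, c = '0' ∨ c = '1')
    (hh : l = [] ∨ l.head? = some '1') : canonBits (l.foldl bitStep 0) = l := by
  induction l using List.reverseRecOn with
  | nil => simp [canonBits]
  | append_singleton xs c ih =>
    have hbxs : ∀ x ∈ xs, x = '0' ∨ x = '1' := fun x hx => hb x (by simp [hx])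
    have hc : c = '0' ∨ c = '1' := hb c (by simp)
    rcases hh with hh | hh
    · simp at hh
    cases xs with
    | nil =>
      simp at hh
      subst hh
      simp [bitStep, canonBits, dChar]
    | cons x xs' =>
      have hh' : (x :: xs').head? = some '1' := by simpa using hh
      have ihx := ih hbxs (Or.inr hh')
      set v := (x :: xs').foldl bitStep 0 with hv
      have hvpos : 0 < v := by
        by_contra hvz
        have hz : v = 0 := by omega
        rw [hz] at ihx
        simp [canonBits] at ihx
      rcases hc with rfl | rfl
      · have hfold : ((x :: xs') ++ ['0']).foldl bitStep 0 = 2 * v := by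
          rw [List.foldl_append, ← hv]; simp [bitStep]
        rw [hfold, canonBits, if_neg (by omega : ¬ 2 * v = 0),
            (by omega : 2 * v / 2 = v), ihx, (by omega : 2 * v % 2 = 0)]
        simp [dChar]
      · have hfold : ((x :: xs') ++ ['1']).foldl bitStep 0 = 2 * v + 1 := by
          rw [List.foldl_append, ← hv]; simp [bitStep]
        rw [hfold, canonBits, if_neg (by omega : ¬ 2 * v + 1 = 0),
            (by omega : (2 * v + 1) / 2 = v), ihx, (by omega : (2 * v + 1) % 2 = 1)]
        simp [dChar]

theorem canonBits_eq_nil_iff (n : Nat) : canonBits n = [] ↔ n = 0 := by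
  constructor
  · intro h
    by_contra hn
    rw [canonBits, if_neg hn] at h
    simp at h
  · intro h; subst h; simp [canonBits]

theorem canonBits_step8 (n : Nat) (hn : 8 ≤ n) :
    canonBits n = canonBits (n / 8) ++ threeBits (n % 8) := by
  rw [canonBits, if_neg (by omega : ¬ n = 0)]
  rw [canonBits, if_neg (by omega : ¬ n / 2 = 0)]
  rw [canonBits, if_neg (by omega : ¬ n / 2 / 2 = 0)]
  rw [(by omega : n / 2 / 2 / 2 = n / 8), (by omega : n / 2 / 2 % 2 = n % 8 / 4),
      (by omega : n / 2 % 2 = n % 8 / 2 % 2), (by omega : n % 2 = n % 8 % 2)]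
  simp [threeBits]

theorem pad_append3 (xs ys : List Char) (hy : ys.length = 3) :
    pad (xs ++ ys) = pad xs ++ ys := by
  unfold pad
  rw [List.length_append, hy,
      (by omega : (3 - (xs.length + 3) % 3) % 3 = (3 - xs.length % 3) % 3),
      List.append_assoc]

theorem pad_len_mod (l : List Char) : (pad l).length % 3 = 0 := by
  unfold pad
  rw [List.length_append, List.length_replicate]
  omega

theorem bGroupLoop_nil : bGroupLoop [] = [] := by rw [bGroupLoop]; simp

theorem bGroupLoop_short (l : List Char) (h1 : ¬ l = []) (h2 : l.length ≤ 3) :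
    bGroupLoop l = PySem.Int.toChars ((PySem.Int.ofCharsBase? l 2).getD 0) := by
  rw [bGroupLoop, dif_neg h1, List.take_of_length_le h2, List.drop_eq_nil_of_le h2,
      bGroupLoop_nil, List.append_nil]

theorem bGroupLoop_append : ∀ (n : Nat) (xs : List Char), xs.length = n → xs.length % 3 = 0 →
    ∀ ys, bGroupLoop (xs ++ ys) = bGroupLoop xs ++ bGroupLoop ys := by
  intro n
  induction n using Nat.strong_induction_on with
  | _ n ih =>
    intro xs hlen hx ys
    by_cases hxe : xs = []
    · subst hxe; simp [bGroupLoop_nil]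
    · have h3 : 3 ≤ xs.length := by
        cases xs with
        | nil => exact absurd rfl hxe
        | cons a l => simp at hx ⊢; omega
      have hne : xs ++ ys ≠ [] := by simp [hxe]
      rw [bGroupLoop, dif_neg hne,
          List.take_append_of_le_length h3, List.drop_append_of_le_length h3]
      rw [show bGroupLoop xs
            = PySem.Int.toChars ((PySem.Int.ofCharsBase? (xs.take 3) 2).getD 0)
              ++ bGroupLoop (xs.drop 3) from by rw [bGroupLoop, dif_neg hxe]]
      rw [ih (n - 3) (by omega) (xs.drop 3) (by simp [hlen]) (by simp; omega) ys,
          List.append_assoc]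

theorem bGroup_threeBits (k : Nat) (hk : k < 8) : bGroupLoop (threeBits k) = [dChar k] := by
  rw [bGroupLoop_short _ (by simp [threeBits]) (by simp [threeBits])]
  interval_cases k <;> decide

theorem canonBits_zero : canonBits 0 = [] := by rw [canonBits]; simp

theorem dChar_zero : dChar 0 = '0' := by decide

theorem pad_canonBits_small (n : Nat) (h0 : 0 < n) (h8 : n < 8) :
    pad (canonBits n) = threeBits n := by
  interval_cases n <;>
    (repeat (rw [canonBits]; norm_num [canonBits_zero])) <;>
    norm_num [pad, threeBits, List.replicate, dChar_zero]

theorem canonOct_small (n : Nat) (h0 : 0 < n) (h8 : n < 8) : canonOct n = [dChar n] := by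
  rw [canonOct, if_neg (by omega : ¬ n = 0), (by omega : n / 8 = 0), (by omega : n % 8 = n)]
  simp [canonOct]

theorem main_regroup (n : Nat) (hn : 0 < n) :
    bGroupLoop (pad (canonBits n)) = canonOct n := by
  induction n using Nat.strong_induction_on with
  | _ n ih =>
    by_cases h8 : n < 8
    · rw [pad_canonBits_small n hn h8, bGroup_threeBits n h8, canonOct_small n hn h8]
    · rw [canonBits_step8 n (by omega),
          pad_append3 _ _ (by simp [threeBits]),
          bGroupLoop_append (pad (canonBits (n / 8))).length _ rfl (pad_len_mod _) _,
          bGroup_threeBits _ (Nat.mod_lt _ (by norm_num)),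
          ih (n / 8) (Nat.div_lt_self hn (by norm_num)) (by omega)]
      conv_rhs => rw [canonOct, if_neg (by omega : ¬ n = 0)]

-- ===== VERDICT (by name: the statement is the Claim_ definition above) =====
theorem hexadecimal_to_octal_spec : Claim_equal_hexadecimal_to_octal := by
  intro number _ hpre
  unfold Spec_hexadecimal_to_octal hexadecimal_to_octal hexadecimal_to_octal_alt
  simp only []
  have hcs : ∀ c ∈ number.toList, hexChars.contains c = true := by
    intro c hc
    exact List.all_eq_true.mp hpre c hc
  set cs := number.toList with hcsdef
  -- the two intermediate values
  have hA : cs.foldl (fun acc c => acc * 16 + (hexDec? (PySem.Chars.upperChar c)).getD 0) 0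
      = ((natFold cs : Nat) : Int) := by
    simpa using foldA_cast cs 0
  have hmap : cs.map (fun c => (hexBin? (PySem.Chars.upperChar c)).getD []) = cs.map nib := rfl
  set stripped := ((cs.map nib).flatten).dropWhile (· == '0') with hstr
  have hval : stripped.foldl bitStep 0 = natFold cs := by
    rw [hstr, dropWhile_fold, flatten_fold cs hcs 0]; rfl
  have hcanon : canonBits (natFold cs) = stripped := by
    rw [← hval]
    apply canonBits_unique
    · intro c hc
      exact flatten_bits cs hcs c ((List.dropWhile_sublist _).mem hc)
    · exact dropWhile_zero_head _ (flatten_bits cs hcs)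
  rw [hmap, hA]
  by_cases hz : natFold cs = 0
  · have hse : stripped = [] := by
      rw [← hcanon, hz]; simp [canonBits]
    rw [hz, ← hstr, if_pos hse]
    norm_num
  · have hsne : stripped ≠ [] := by
      rw [← hcanon]
      simpa [canonBits_eq_nil_iff] using hz
    rw [← hstr, if_neg hsne]
    have hbeq : ((((natFold cs : Nat) : Int)) == 0) = false := by
      simp; omega
    rw [hbeq]
    simp only [Bool.false_eq_true, if_false]
    rw [aOctLoop_eq (natFold cs) [], List.append_nil, ← hcanon]
    rw [show List.replicate ((3 - (canonBits (natFold cs)).length % 3) % 3) '0'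
          ++ canonBits (natFold cs) = pad (canonBits (natFold cs)) from rfl]
    rw [main_regroup (natFold cs) (by omega)]
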